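-- pv_equiv track=rewrite | github.com/APrioriInvestments/typed_python | typed_python/compiler/type_wrappers/min_max_wrapper.py | i_max
-- ===== SOURCE A (Python) =====
-- def i_max(v):
--     first = 1
--     for e in v:
--         if first or e > ret:  # noqa: F821
--             first = 0
--             ret = e
--     if first:
--         raise ValueError("max() arg is an empty sequence")
--     return ret
-- ===== SOURCE B (Python) =====
-- def i_max(v):
--     s = sorted(v)
--     if not s:
--         raise ValueError("max() arg is an empty sequence")
--     return s[-1]
-- ===== Notes on version B (the rewrite author's own statement) =====
-- stated objective: alternative
-- what changed: Replaces A's single-pass flag-and-accumulator scan with sort-then-take-last: after an emptiness check B returns the last element of the sorted copy, which is the same maximum Int.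
import Mathlib
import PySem

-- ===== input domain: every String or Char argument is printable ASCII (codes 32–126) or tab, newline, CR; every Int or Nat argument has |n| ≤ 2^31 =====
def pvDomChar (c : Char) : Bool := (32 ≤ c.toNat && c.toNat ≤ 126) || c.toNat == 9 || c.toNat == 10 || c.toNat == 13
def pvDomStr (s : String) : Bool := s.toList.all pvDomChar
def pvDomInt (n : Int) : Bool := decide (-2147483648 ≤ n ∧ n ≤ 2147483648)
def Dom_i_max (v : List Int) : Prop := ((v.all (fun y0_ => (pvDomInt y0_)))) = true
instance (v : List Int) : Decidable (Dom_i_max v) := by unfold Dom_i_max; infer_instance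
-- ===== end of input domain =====

-- B replaces A's single-pass flag-and-accumulator scan with sort-then-take-last; same Int on every non-empty list.

-- ===== PORT A =====
-- state = (first, ret); ret's initial 0 is never read because first = true until the first element.
def i_max (v : List Int) : Int :=
  (v.foldl (fun (st : Bool × Int) e => if st.1 || e > st.2 then (false, e) else st) (true, 0)).2

-- ===== PORT B =====
-- s[-1]: pyGet?'s none (empty s) is unreachable under Pre_ (Python raises ValueError there).
def i_max_alt (v : List Int) : Int :=
  let s := PySem.List.sorted v (fun x => x) false
  (PySem.List.pyGet? s (-1)).getD 0

-- ===== PRECONDITION & SPEC =====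
-- A raises ValueError on the empty list; Pre_ excludes exactly that input.
def Pre_i_max (v : List Int) : Prop := v ≠ []
instance (v : List Int) : Decidable (Pre_i_max v) := by unfold Pre_i_max; infer_instance
def pvWitness_i_max : List Int := ([3, 1, 3, 2])
def Spec_i_max (v : List Int) (out : Int) : Prop := out = i_max_alt v
instance (v : List Int) (out : Int) : Decidable (Spec_i_max v out) := by unfold Spec_i_max; infer_instance

-- ===== CLAIM =====
def Claim_equal_i_max : Prop := ∀ (v : List Int), Dom_i_max v → Pre_i_max v → Spec_i_max v (i_max v)

-- ===== LEMMAS AND PROOFS =====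

-- A's fold with the 'first' flag, once seeded, is a running max.
theorem i_max_fold_eq (t : List Int) (r : Int) :
    (t.foldl (fun (st : Bool × Int) e => if st.1 || e > st.2 then (false, e) else st) (false, r)).2
      = t.foldl max r := by
  induction t generalizing r with
  | nil => rfl
  | cons a t ih =>
    simp only [List.foldl, Bool.false_or]
    by_cases h : a > r
    · rw [if_pos (by simpa using h), ih a, max_eq_right (le_of_lt h)]
    · rw [if_neg (by simpa using h), ih r, max_eq_left (le_of_not_gt h)]

theorem foldl_max_mem (t : List Int) (r : Int) : t.foldl max r ∈ r :: t := by
  induction t generalizing r with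
  | nil => simp
  | cons a t ih =>
    simp only [List.foldl]
    rw [List.mem_cons, List.mem_cons]
    have := ih (max r a)
    rw [List.mem_cons] at this
    rcases this with h | h
    · rw [h]
      rcases le_total r a with hle | hle
      · right; left; exact max_eq_right hle
      · left; exact max_eq_left hle
    · right; right; exact h

theorem foldl_max_ub (t : List Int) (r : Int) : ∀ y ∈ r :: t, y ≤ t.foldl max r := by
  induction t generalizing r with
  | nil => intro y hy; simp at hy; simp [hy]
  | cons a t ih =>
    intro y hy
    simp only [List.foldl]
    rw [List.mem_cons, List.mem_cons] at hy
    rcases hy with rfl | rfl | h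
    · exact le_trans (le_max_left y a) (ih (max y a) _ (by simp))
    · exact le_trans (le_max_right r y) (ih (max r y) _ (by simp))
    · exact ih (max r a) y (by simp [h])

theorem getLast_ub (s : List Int) :
    s.Pairwise (· ≤ ·) → ∀ (h : s ≠ []) (y : Int), y ∈ s → y ≤ s.getLast h := by
  induction s with
  | nil => intro _ h; exact absurd rfl h
  | cons a s ih =>
    intro hs h y hy
    rw [List.mem_cons] at hy
    cases s with
    | nil =>
      rcases hy with rfl | h'
      · simp [List.getLast]
      · simp at h'
    | cons b s2 =>
      have hpw' : (b :: s2).Pairwise (· ≤ ·) := (List.pairwise_cons.mp hs).2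
      rw [List.getLast_cons (by simp)]
      rcases hy with rfl | h'
      · have hab : y ≤ b := (List.pairwise_cons.mp hs).1 b (by simp)
        exact le_trans hab (ih hpw' (by simp) b (by simp))
      · exact ih hpw' (by simp) y h'

-- ===== VERDICT =====
theorem i_max_spec : Claim_equal_i_max := by
  intro v _ hpre
  show i_max v = i_max_alt v
  obtain ⟨h, t, rfl⟩ : ∃ h t, v = h :: t := by
    cases v with
    | nil => exact absurd rfl hpre
    | cons h t => exact ⟨h, t, rfl⟩
  set s := PySem.List.sorted (h :: t) (fun x => x) false with hs
  have hsne : s ≠ [] := by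
    intro he
    have := (PySem.List.sorted_eq_nil_iff (h :: t) (fun x => x) false).mp (hs ▸ he)
    simp at this
  have hperm : s.Perm (h :: t) := PySem.List.sorted_perm _ _ _
  have hpw : s.Pairwise (· ≤ ·) := by
    simpa using PySem.List.sorted_pairwise (xs := h :: t) (key := fun x => x)
  have ha : i_max (h :: t) = t.foldl max h := by
    simp only [i_max, List.foldl]
    rw [if_pos (by simp)]
    exact i_max_fold_eq t h
  have hb : i_max_alt (h :: t) = s.getLast hsne := by
    simp only [i_max_alt, ← hs, PySem.List.pyGet?_neg_one]
    rw [List.getLast?_eq_some_getLast hsne, Option.getD_some]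
  rw [ha, hb]
  have hmemA : t.foldl max h ∈ h :: t := foldl_max_mem t h
  have hubA := foldl_max_ub t h
  have hmemB : s.getLast hsne ∈ h :: t := hperm.mem_iff.mp (List.getLast_mem hsne)
  have hubB := getLast_ub s hpw hsne
  exact le_antisymm (hubB _ (hperm.mem_iff.mpr hmemA)) (hubA _ hmemB)
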